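-- pv_equiv track=rewrite | github.com/ckuethe/radiacode-tools | src/radqr.py | b45_encode
-- ===== SOURCE A (Python) =====
-- from typing import Any, Dict, List, Optional, Tuple, Union
--
-- _B45C = "0123456789ABCDEFGHIJKLMNOPQRSTUVWXYZ $%*+-./:"
--
-- def b45_encode(s: Union[str, bytearray]) -> str:
--     "Encode a string or bytearray into a base45 ASCII *string*"
--     rv = []
--     if isinstance(s, str):
--         s = bytearray(s, "utf-8")
--     padded = False
--     for i in range(0, len(s), 2):
--         try:
--             intval = s[i] * 256 + s[i + 1]
--         except IndexError:
--             intval = s[i]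
--             padded = True
--
--         r, x = divmod(intval, 45)
--         z, y = divmod(r, 45)
--
--         rv.extend([_B45C[c] for c in (x, y, z)])
--
--     if padded:
--         rv.pop(-1)
--     return "".join(rv)
-- ===== SOURCE B (Python) =====
-- _B45C = "0123456789ABCDEFGHIJKLMNOPQRSTUVWXYZ $%*+-./:"
--
--
-- def _b45_digits(v, width):
--     "exactly `width` little-endian base-45 digit characters of v"
--     ds = ""
--     for _ in range(width):
--         v, d = divmod(v, 45)
--         ds += _B45C[d]
--     return ds
--
--
-- def b45_encode(s):
--     "Encode a string or bytearray into a base45 ASCII *string*"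
--     if isinstance(s, str):
--         s = bytes(s, "utf-8")
--     groups = [s[i:i + 2] for i in range(0, len(s), 2)]
--     return "".join(_b45_digits(int.from_bytes(g, "big"), len(g) + 1) for g in groups)
-- ===== Notes on version B (the rewrite author's own statement) =====
-- stated objective: alternative
-- what changed: Replaces A's single index loop with try/except probe, padded flag, fixed divmod chain and final pop by staged passes: chunk the bytes into 2-byte slices, read each slice as a big-endian integer, and expand it with a generic base-45 digit loop whose width is the chunk length plus one.
import Mathlib
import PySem

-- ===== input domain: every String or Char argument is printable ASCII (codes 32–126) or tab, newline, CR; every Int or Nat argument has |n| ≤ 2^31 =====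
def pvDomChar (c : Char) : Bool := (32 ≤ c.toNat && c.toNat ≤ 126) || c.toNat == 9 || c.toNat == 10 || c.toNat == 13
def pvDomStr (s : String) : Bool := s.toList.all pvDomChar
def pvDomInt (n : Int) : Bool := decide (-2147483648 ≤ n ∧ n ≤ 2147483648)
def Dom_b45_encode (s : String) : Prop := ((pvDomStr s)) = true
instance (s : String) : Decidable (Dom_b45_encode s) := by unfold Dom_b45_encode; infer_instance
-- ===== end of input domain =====

-- B replaces A's index loop with try/except, padded flag and final pop by staged passes:
-- chunk the bytes by twos, read each chunk as a big-endian integer, expand it with a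
-- generic base-45 digit loop of width len(chunk)+1 (objective: alternative; not faster).
-- On the stated domain (ASCII ≤ 126) the utf-8 bytes of s are exactly its character codes,
-- so both ports work on s.toList.map Char.toNat.

-- the shared module constant _B45C
def pvB45C : List Char := "0123456789ABCDEFGHIJKLMNOPQRSTUVWXYZ $%*+-./:".toList
-- _B45C[k]; every index used is < 45, so the default is never reached
def pvC (k : Nat) : Char := pvB45C.getD k '0'

-- ===== PORT A =====
-- the 'for i in range(0, len(s), 2)' loop as the obvious recursion on the index i;
-- s[i+1] raising IndexError ↔ b[i+1]? = none (i+1 ≥ 0, so getElem? is exact here)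
def b45aLoop (b : List Nat) (i : Nat) (rv : List Char) (padded : Bool) : List Char × Bool :=
  if h : i < b.length then
    match b[i+1]? with
    | some w =>
        let intval := b[i] * 256 + w
        b45aLoop b (i+2) (rv ++ [pvC (intval % 45), pvC (intval / 45 % 45), pvC (intval / 45 / 45)]) padded
    | none =>
        let intval := b[i]
        b45aLoop b (i+2) (rv ++ [pvC (intval % 45), pvC (intval / 45 % 45), pvC (intval / 45 / 45)]) true
  else (rv, padded)
termination_by b.length - i
decreasing_by all_goals omega

def b45_encode (s : String) : String :=
  let b := s.toList.map Char.toNat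
  let (rv, padded) := b45aLoop b 0 [] false
  String.ofList (if padded then rv.dropLast else rv)   -- rv.pop(-1)

-- ===== PORT B =====
-- Source B stage 1: groups = [s[i:i+2] for i in range(0, len(s), 2)] — chunk the bytes by twos
def pvChunk2 : List Nat → List (List Nat)
  | a :: b :: t => [a, b] :: pvChunk2 t
  | [v] => [[v]]
  | [] => []

-- int.from_bytes(g, "big")
def pvFromBytes (g : List Nat) : Nat := g.foldl (fun acc b => acc * 256 + b) 0

-- _b45_digits(v, width): the 'for _ in range(width)' divmod loop, appending one char per step
def pvDigits : Nat → Nat → List Char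
  | _, 0 => []
  | v, w + 1 => pvC (v % 45) :: pvDigits (v / 45) w

def b45_encode_alt (s : String) : String :=
  String.ofList
    (((pvChunk2 (s.toList.map Char.toNat)).map
        (fun g => pvDigits (pvFromBytes g) (g.length + 1))).flatten)

-- ===== PRECONDITION & SPEC =====
def Spec_b45_encode (s : String) (out : String) : Prop := out = b45_encode_alt s
instance (s : String) (out : String) : Decidable (Spec_b45_encode s out) := by unfold Spec_b45_encode; infer_instance

-- ===== CLAIM (what is proved, stated in full; the proofs are below) =====
def Claim_equal_b45_encode : Prop := ∀ (s : String), Dom_b45_encode s → Spec_b45_encode s (b45_encode s)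

-- ===== LEMMAS AND PROOFS =====

-- the three chars A appends for one loop step, including the phantom third char of an odd tail
def b45Three : List Nat → List Char
  | [] => []
  | [v] => [pvC (v % 45), pvC (v / 45 % 45), pvC (v / 45 / 45)]
  | a :: b :: t =>
      [pvC ((a * 256 + b) % 45), pvC ((a * 256 + b) / 45 % 45), pvC ((a * 256 + b) / 45 / 45)]
        ++ b45Three t

theorem b45aLoop_eq : ∀ (l b : List Nat) (i : Nat) (rv : List Char) (p : Bool),
    b.drop i = l →
    b45aLoop b i rv p = (rv ++ b45Three l, p || decide (l.length % 2 = 1)) := by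
  intro l
  induction l using b45Three.induct with
  | case1 =>
      intro b i rv p hd
      have hi : b.length ≤ i := by
        by_contra h
        have := List.drop_eq_nil_iff.mp hd
        omega
      unfold b45aLoop
      simp [Nat.not_lt.mpr hi, b45Three]
  | case2 v =>
      intro b i rv p hd
      have hlen : i + 1 = b.length := by
        have := congrArg List.length hd
        simp [List.length_drop] at this
        omega
      have hi : i < b.length := by omega
      have h0 : b[i]? = some v := by
        have h := (List.getElem?_drop : (List.drop i b)[0]? = b[i + 0]?)
        simpa [hd] using h.symm
      have h1 : b[i+1]? = none := by
        simp; omega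
      have hv : b[i] = v := by
        have := List.getElem?_eq_getElem (l := b) (i := i) (by omega)
        rw [this] at h0; exact Option.some.inj h0
      unfold b45aLoop
      simp only [hi, dif_pos, h1, hv]
      rw [b45aLoop]
      have h2 : ¬ (i + 2 < b.length) := by omega
      simp [h2, b45Three]
  | case3 a c t ih =>
      intro b i rv p hd
      have hi : i < b.length := by
        have := congrArg List.length hd
        simp [List.length_drop] at this
        omega
      have h0 : b[i]? = some a := by
        have h := (List.getElem?_drop : (List.drop i b)[0]? = b[i + 0]?)
        simpa [hd] using h.symm
      have h1 : b[i+1]? = some c := by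
        have h := (List.getElem?_drop : (List.drop i b)[1]? = b[i + 1]?)
        simpa [hd] using h.symm
      have hv : b[i] = a := by
        have := List.getElem?_eq_getElem (l := b) (i := i) (by omega)
        rw [this] at h0; exact Option.some.inj h0
      have hd2 : b.drop (i + 2) = t := by
        have h : (List.drop i b).drop 2 = b.drop (i + 2) := by
          rw [List.drop_drop]
          try rw [Nat.add_comm]
        rw [← h, hd]; rfl
      unfold b45aLoop
      simp only [hi, dif_pos, h1, hv]
      rw [ih b (i+2) _ _ hd2]
      simp only [b45Three, List.length_cons]
      have hpar : (t.length + 1 + 1) % 2 = t.length % 2 := by omega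
      simp [hpar, List.append_assoc]

theorem b45Three_ne_nil (x : Nat) (t : List Nat) : b45Three (x :: t) ≠ [] := by
  cases t <;> simp [b45Three]

-- B's staged chunk/value/digits passes equal A's char stream, with the phantom
-- third char dropped for an odd tail
theorem b45alt_eq : ∀ (l : List Nat), (∀ x ∈ l, x < 256) →
    ((pvChunk2 l).map (fun g => pvDigits (pvFromBytes g) (g.length + 1))).flatten =
      (if decide (l.length % 2 = 1) then (b45Three l).dropLast else b45Three l) := by
  intro l
  induction l using pvChunk2.induct with
  | case3 => simp [pvChunk2, b45Three]
  | case2 v =>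
      intro hb
      have hv : v / 45 < 45 := by
        have := hb v (by simp)
        omega
      simp [pvChunk2, pvFromBytes, pvDigits, b45Three, Nat.mod_eq_of_lt hv]
  | case1 a c t ih =>
      intro hb
      have ih' := ih (fun x hx => hb x (by simp [hx]))
      have hpar : (t.length + 1 + 1) % 2 = t.length % 2 := by omega
      have hz : (a * 256 + c) / 45 / 45 < 45 := by
        have ha := hb a (by simp)
        have hc := hb c (by simp)
        omega
      simp only [pvChunk2, List.map_cons, List.flatten_cons, ih', List.length_cons, hpar]
      have hdig : pvDigits (pvFromBytes [a, c]) (([] : List Nat).length + 1 + 1 + 1) =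
          [pvC ((a * 256 + c) % 45), pvC ((a * 256 + c) / 45 % 45),
           pvC ((a * 256 + c) / 45 / 45)] := by
        simp [pvDigits, pvFromBytes, Nat.mod_eq_of_lt hz]
      rw [hdig]
      by_cases h : t.length % 2 = 1
      · have hne : b45Three t ≠ [] := by
          cases t with
          | nil => simp at h
          | cons x xs => exact b45Three_ne_nil x xs
        simp [h, b45Three, List.dropLast_cons_of_ne_nil, hne]
      · simp [h, b45Three]

-- ===== VERDICT (by name: the statement is the Claim_ definition above) =====
theorem b45_encode_spec : Claim_equal_b45_encode := by
  intro s hdom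
  unfold Spec_b45_encode b45_encode b45_encode_alt
  have hb : ∀ x ∈ s.toList.map Char.toNat, x < 256 := by
    intro x hx
    obtain ⟨ch, hc, rfl⟩ := List.mem_map.mp hx
    have hall := List.all_eq_true.mp hdom ch hc
    unfold pvDomChar at hall
    simp only [Bool.or_eq_true, Bool.and_eq_true, decide_eq_true_eq, beq_iff_eq] at hall
    omega
  have h := b45aLoop_eq (s.toList.map Char.toNat) (s.toList.map Char.toNat) 0 [] false rfl
  rw [b45alt_eq _ hb]
  simp only [h, List.length_map, Bool.false_or]
  simp
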